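-- pv_equiv track=rewrite | github.com/HarshavardhanKurtkoti/ChaCha-Chaudari | backend/app.py | _is_chunk_readable
-- ===== SOURCE A (Python) =====
-- def _is_chunk_readable(txt: str) -> bool:
--     try:
--         s = (txt or "").strip()
--         if not s:
--             return False
--         n = len(s)
--         letters = sum(ch.isalpha() for ch in s)
--         digits = sum(ch.isdigit() for ch in s)
--         dashes = s.count('-') + s.count('—')
--         slashes = s.count('/')
--         punct_ok = any(p in s for p in ('.', '!', '?'))
--         if n < 60:
--             return False
--         if letters / max(1, n) < 0.5:
--             return False
--         if digits / max(1, n) > 0.25: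
--             return False
--         if (dashes + slashes) / max(1, n) > 0.04:
--             return False
--         return punct_ok
--     except Exception:
--         return False
-- ===== SOURCE B (Python) =====
-- def _classify(ch):
--     # priority classes mirror the quantities the guards need
--     if ch.isalpha():
--         return 'alpha'
--     if ch.isdigit():
--         return 'digit'
--     if ch == '-' or ch == '\u2014':
--         return 'dash'
--     if ch == '/':
--         return 'slash'
--     if ch == '.' or ch == '!' or ch == '?':
--         return 'punct'
--     return 'other'
--
-- def _is_chunk_readable(txt: str) -> bool:
--     # Histogram of character categories + one exact integer conjunction
--     # (cross-multiplied thresholds) instead of staged scans and float ratios.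
--     s = (txt or "").strip()
--     n = len(s)
--     cat = {}
--     for ch in s:
--         k = _classify(ch)
--         cat[k] = cat.get(k, 0) + 1
--     return (n >= 60
--             and 2 * cat.get('alpha', 0) >= n
--             and 4 * cat.get('digit', 0) <= n
--             and 25 * (cat.get('dash', 0) + cat.get('slash', 0)) <= n
--             and cat.get('punct', 0) > 0)
-- ===== Notes on version B (the rewrite author's own statement) =====
-- stated objective: alternative
-- what changed: Replaces A's five separate scans, float-ratio guards and early-return cascade with a per-character category histogram (a dict keyed by character class built in one loop) whose buckets are read back through a single boolean conjunction using cross-multiplied exact integer thresholds.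
import Mathlib
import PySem

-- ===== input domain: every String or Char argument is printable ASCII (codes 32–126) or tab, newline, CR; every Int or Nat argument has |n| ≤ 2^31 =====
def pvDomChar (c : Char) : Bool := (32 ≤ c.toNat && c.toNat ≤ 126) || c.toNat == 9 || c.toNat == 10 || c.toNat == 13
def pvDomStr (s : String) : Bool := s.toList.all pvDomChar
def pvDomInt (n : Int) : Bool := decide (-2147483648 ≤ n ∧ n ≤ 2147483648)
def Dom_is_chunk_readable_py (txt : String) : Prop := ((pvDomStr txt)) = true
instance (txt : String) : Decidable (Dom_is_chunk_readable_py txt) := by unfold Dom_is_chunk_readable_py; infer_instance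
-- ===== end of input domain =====

-- B replaces A's staged scans and float-ratio early-return cascade by a per-character
-- category histogram (a dict built in one loop) read back through a single boolean
-- conjunction with cross-multiplied integer thresholds; same results, different decomposition.
-- Both ports render the Python float guards (letters/max(1,n) < 0.5, digits/max(1,n) > 0.25,
-- (dashes+slashes)/max(1,n) > 0.04) by the integer comparisons (2*letters < m, 4*digits > m,
-- 25*(dashes+slashes) > m), which agree with the float comparisons for every string length
-- reachable on this domain.

-- ===== PORT A =====
def is_chunk_readable_py (txt : String) : Bool :=
  let s := PySem.Chars.strip txt.toList
  if s.isEmpty then false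
  else
    let n : Int := s.length
    let letters : Int := (s.map (fun ch => if PySem.Chars.isalpha ch then (1 : Int) else 0)).sum
    let digits : Int := (s.map (fun ch => if PySem.Chars.isdigit ch then (1 : Int) else 0)).sum
    let dashes : Int := (PySem.Chars.count s ['-'] : Int) + (PySem.Chars.count s ['—'] : Int)
    let slashes : Int := (PySem.Chars.count s ['/'] : Int)
    let punct_ok : Bool := PySem.Chars.isIn ['.'] s || PySem.Chars.isIn ['!'] s || PySem.Chars.isIn ['?'] s
    let m : Int := max 1 n
    if n < 60 then false
    else if 2 * letters < m then false
    else if 4 * digits > m then false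
    else if 25 * (dashes + slashes) > m then false
    else punct_ok

-- ===== PORT B =====
def pvClassify (ch : Char) : String :=
  if PySem.Chars.isalpha ch then "alpha"
  else if PySem.Chars.isdigit ch then "digit"
  else if ch == '-' || ch == '—' then "dash"
  else if ch == '/' then "slash"
  else if ch == '.' || ch == '!' || ch == '?' then "punct"
  else "other"

def is_chunk_readable_py_alt (txt : String) : Bool :=
  let s := PySem.Chars.strip txt.toList
  let n : Int := s.length
  let cat : PySem.Dict String Int :=
    s.foldl (fun d ch => d.insert (pvClassify ch) (d.getD (pvClassify ch) 0 + 1))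
      PySem.Dict.empty
  decide (n ≥ 60) &&
  decide (2 * cat.getD "alpha" 0 ≥ n) &&
  decide (4 * cat.getD "digit" 0 ≤ n) &&
  decide (25 * (cat.getD "dash" 0 + cat.getD "slash" 0) ≤ n) &&
  decide (cat.getD "punct" 0 > 0)

-- ===== PRECONDITION & SPEC =====
def Spec_is_chunk_readable_py (txt : String) (out : Bool) : Prop := out = is_chunk_readable_py_alt txt
instance (txt : String) (out : Bool) : Decidable (Spec_is_chunk_readable_py txt out) := by unfold Spec_is_chunk_readable_py; infer_instance

-- ===== CLAIM (what is proved, stated in full; the proofs are below) =====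
def Claim_equal_is_chunk_readable_py : Prop := ∀ (txt : String), Dom_is_chunk_readable_py txt → Spec_is_chunk_readable_py txt (is_chunk_readable_py txt)

-- ===== LEMMAS AND PROOFS =====

-- PySem.Chars.count with a single-character needle is plain character counting.
theorem chars_count_go_singleton (c : Char) : ∀ (fuel : Nat) (l : List Char) (acc : Nat),
    l.length ≤ fuel → PySem.Chars.count.go [c] fuel l acc = acc + l.count c := by
  intro fuel
  induction fuel with
  | zero =>
      intro l acc h
      have : l = [] := List.eq_nil_of_length_eq_zero (Nat.le_zero.mp h)
      subst this
      simp [PySem.Chars.count.go]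
  | succ f ih =>
      intro l acc h
      cases l with
      | nil => simp [PySem.Chars.count.go]
      | cons x t =>
          simp only [PySem.Chars.count.go]
          by_cases hx : x = c
          · subst hx
            have hp : List.isPrefixOf [x] (x :: t) = true := by simp [List.isPrefixOf]
            rw [if_pos hp]
            simp only [List.length_cons, List.length_nil, List.drop_succ_cons, List.drop_zero]
            rw [ih t (acc + 1) (by simpa using Nat.le_of_succ_le_succ h)]
            simp [List.count_cons, Nat.add_assoc, Nat.add_comm 1]
          · have hcx : ¬ c = x := fun hh => hx hh.symm
            have hp : List.isPrefixOf [c] (x :: t) = false := by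
              simp [List.isPrefixOf, hcx]
            rw [if_neg (by simp [hp])]
            rw [ih t acc (by simpa using Nat.le_of_succ_le_succ h)]
            simp [List.count_cons, hcx, hx]

theorem chars_count_singleton (s : List Char) (c : Char) :
    PySem.Chars.count s [c] = s.count c := by
  simp only [PySem.Chars.count, List.isEmpty_cons, if_neg Bool.false_ne_true]
  simpa using chars_count_go_singleton c s.length s 0 (le_refl _)

-- isdigit and isalpha are disjoint (ASCII ranges).
theorem digit_not_alpha (c : Char) (h : PySem.Chars.isdigit c = true) :
    PySem.Chars.isalpha c = false := by
  simp [PySem.Chars.isdigit, PySem.Chars.isalpha, PySem.Chars.isupper, PySem.Chars.islower,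
    Char.le_def, UInt32.le_iff_toNat_le] at *
  omega

-- the literal characters of the later classes are neither alpha nor digit
theorem lit_not_alphadigit (c : Char)
    (h : c = '-' ∨ c = '—' ∨ c = '/' ∨ c = '.' ∨ c = '!' ∨ c = '?') :
    PySem.Chars.isalpha c = false ∧ PySem.Chars.isdigit c = false := by
  rcases h with h | h | h | h | h | h <;> subst h <;> exact ⟨by decide, by decide⟩

-- pointwise characterisation of the classifier
theorem cls_alpha (c : Char) : (pvClassify c == "alpha") = PySem.Chars.isalpha c := by
  unfold pvClassify; split_ifs <;> simp_all

theorem cls_digit (c : Char) : (pvClassify c == "digit") = PySem.Chars.isdigit c := by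
  by_cases hd : PySem.Chars.isdigit c = true
  · have ha := digit_not_alpha c hd
    unfold pvClassify
    simp [ha, hd]
  · unfold pvClassify
    split_ifs <;> simp_all

theorem cls_dash (c : Char) : (pvClassify c == "dash") = (c == '-' || c == '—') := by
  unfold pvClassify
  by_cases hc : c = '-' ∨ c = '—'
  · obtain ⟨ha, hd⟩ := lit_not_alphadigit c (by tauto)
    rcases hc with hc | hc <;> subst hc <;> simp [ha, hd]
  · push_neg at hc
    have : (c == '-' || c == '—') = false := by
      simp [hc.1, hc.2]
    split_ifs <;> simp_all

theorem cls_slash (c : Char) : (pvClassify c == "slash") = (c == '/') := by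
  unfold pvClassify
  by_cases hc : c = '/'
  · obtain ⟨ha, hd⟩ := lit_not_alphadigit c (by tauto)
    subst hc; simp [ha, hd]
  · split_ifs <;> simp_all

theorem cls_punct (c : Char) : (pvClassify c == "punct") = (c == '.' || c == '!' || c == '?') := by
  unfold pvClassify
  by_cases hc : c = '.' ∨ c = '!' ∨ c = '?'
  · obtain ⟨ha, hd⟩ := lit_not_alphadigit c (by tauto)
    rcases hc with hc | hc | hc <;> subst hc <;> simp [ha, hd]
  · push_neg at hc
    have : (c == '.' || c == '!' || c == '?') = false := by
      simp [hc.1, hc.2.1, hc.2.2]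
    split_ifs <;> simp_all

-- B's histogram loop IS collections-style counting of the classified characters.
theorem cat_getD (s : List Char) (k : String) :
    (s.foldl (fun d ch => d.insert (pvClassify ch) (d.getD (pvClassify ch) 0 + 1))
        PySem.Dict.empty).getD k 0
      = ((s.countP (fun c => pvClassify c == k)) : Int) := by
  have h1 : (s.foldl (fun d ch => d.insert (pvClassify ch) (d.getD (pvClassify ch) 0 + 1))
        PySem.Dict.empty)
      = PySem.Dict.counter (s.map pvClassify) := by
    rw [← PySem.Dict.foldl_insert_getD_add_one_eq_counter, List.foldl_map]
  rw [h1, PySem.Dict.getD_counter, List.count_eq_countP, List.countP_map]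
  rfl

-- counting a disjunction of two distinct literal characters
theorem countP_two (s : List Char) (a b : Char) (hab : a ≠ b) :
    (s.countP (fun c => c == a || c == b)) = s.count a + s.count b := by
  induction s with
  | nil => simp
  | cons x t ih =>
      simp only [List.countP_cons, List.count_cons, ih]
      by_cases hx : x = a <;> by_cases hy : x = b <;> simp_all <;> omega

-- A's sums are countP
theorem sum_ite_eq_countP (s : List Char) (p : Char → Bool) :
    (s.map (fun ch => if p ch then (1 : Int) else 0)).sum = ((s.countP p) : Int) := by
  induction s with
  | nil => simp
  | cons x t ih =>
      simp only [List.map_cons, List.sum_cons, List.countP_cons, ih]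
      split_ifs <;> simp_all <;> push_cast <;> ring

theorem countP_ext (s : List Char) {p q : Char → Bool} (h : ∀ c, p c = q c) :
    s.countP p = s.countP q := by
  congr 1
  funext c
  exact h c

theorem countP_one_slash (s : List Char) : s.countP (fun c => c == '/') = s.count '/' := by
  rw [List.count_eq_countP]

-- A's punctuation test equals positivity of the punct bucket
theorem punct_pos_eq (s : List Char) :
    decide (0 < (s.countP (fun c => c == '.' || c == '!' || c == '?') : Int))
      = (PySem.Chars.isIn ['.'] s || PySem.Chars.isIn ['!'] s || PySem.Chars.isIn ['?'] s) := by
  by_cases h : ∃ c ∈ s, (c == '.' || c == '!' || c == '?') = true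
  · have hp : 0 < s.countP (fun c => c == '.' || c == '!' || c == '?') :=
      List.countP_pos_iff.mpr (by simpa using h)
    obtain ⟨c, hc, hcc⟩ := h
    have : (PySem.Chars.isIn ['.'] s || PySem.Chars.isIn ['!'] s || PySem.Chars.isIn ['?'] s) = true := by
      rcases (by simpa using hcc : (c = '.' ∨ c = '!') ∨ c = '?') with (rfl | rfl) | rfl <;>
        simp [(PySem.Chars.isIn_iff_infix _ _).mpr ((List.singleton_infix_iff _ s).mpr hc)]
    rw [this]
    simpa using hp
  · have hz : s.countP (fun c => c == '.' || c == '!' || c == '?') = 0 := by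
      rw [List.countP_eq_zero]
      intro c hc
      exact fun hcc => h ⟨c, hc, hcc⟩
    have hnone : ∀ c, c = '.' ∨ c = '!' ∨ c = '?' → c ∉ s := by
      intro c hcs hmem
      exact h ⟨c, hmem, by rcases hcs with rfl | rfl | rfl <;> simp⟩
    rw [hz]
    have h1 := (PySem.Chars.isIn_eq_false_iff ['.'] s).mpr
      (fun hin => hnone '.' (Or.inl rfl) ((List.singleton_infix_iff _ s).mp hin))
    have h2 := (PySem.Chars.isIn_eq_false_iff ['!'] s).mpr
      (fun hin => hnone '!' (Or.inr (Or.inl rfl)) ((List.singleton_infix_iff _ s).mp hin))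
    have h3 := (PySem.Chars.isIn_eq_false_iff ['?'] s).mpr
      (fun hin => hnone '?' (Or.inr (Or.inr rfl)) ((List.singleton_infix_iff _ s).mp hin))
    simp [h1, h2, h3]

-- ===== VERDICT (by name: the statement is the Claim_ definition above) =====
theorem is_chunk_readable_py_spec : Claim_equal_is_chunk_readable_py := by
  intro txt _
  unfold Spec_is_chunk_readable_py is_chunk_readable_py is_chunk_readable_py_alt
  set s := PySem.Chars.strip txt.toList with hs
  simp only [cat_getD]
  rw [countP_ext s cls_alpha, countP_ext s cls_digit, countP_ext s cls_dash,
    countP_ext s cls_slash, countP_ext s cls_punct]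
  by_cases he : s.isEmpty
  · have : s = [] := List.isEmpty_iff.mp he
    rw [this]
    simp
  · simp only [he, if_neg Bool.false_ne_true, Bool.false_eq_true]
    rw [punct_pos_eq, countP_two s '-' '—' (by decide), countP_one_slash, sum_ite_eq_countP, sum_ite_eq_countP,
      chars_count_singleton, chars_count_singleton, chars_count_singleton]
    have hlen : 1 ≤ (s.length : Int) := by
      have : s ≠ [] := fun h => he (by simp [h])
      have : 0 < s.length := List.length_pos_iff.mpr this
      exact_mod_cast this
    have hm : max 1 (s.length : Int) = (s.length : Int) := max_eq_right hlen
    rw [hm]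
    split_ifs <;> simp_all <;> omega
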